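-- pv_equiv track=rewrite | github.com/hwang127/Typing-Test-with-Autocorrection | typing_test.py | swap_score
-- ===== SOURCE A (Python) =====
-- def swap_score(w1,w2):
--     '''
--     You should consider the leftmost character of each string to correspond to each other. For example, if the two inputs are "word" and "weird", we'll only consider potential substitutions for "word" and "weir".
--     '''
--     if w1==w2:
--         return 0
--     if len(w1)>len(w2):
--         w1=w1[:len(w2)]
--     else:
--         w2=w2[:len(w1)]
--     if w1[0]==w2[0]:
--         return swap_score(w1[1:],w2[1:])
--     else:
--         return 1+swap_score(w1[1:],w2[1:])
-- ===== SOURCE B (Python) =====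
-- def swap_score(w1, w2):
--     count = 0
--     for c1, c2 in zip(w1, w2):
--         if c1 != c2:
--             count += 1
--     return count
-- ===== Notes on version B (the rewrite author's own statement) =====
-- stated objective: faster
-- what changed: Replaces the recursion-with-slicing (each step copies both strings twice) by a single iterative pass over zip(w1, w2) with an explicit mismatch counter.
import Mathlib
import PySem

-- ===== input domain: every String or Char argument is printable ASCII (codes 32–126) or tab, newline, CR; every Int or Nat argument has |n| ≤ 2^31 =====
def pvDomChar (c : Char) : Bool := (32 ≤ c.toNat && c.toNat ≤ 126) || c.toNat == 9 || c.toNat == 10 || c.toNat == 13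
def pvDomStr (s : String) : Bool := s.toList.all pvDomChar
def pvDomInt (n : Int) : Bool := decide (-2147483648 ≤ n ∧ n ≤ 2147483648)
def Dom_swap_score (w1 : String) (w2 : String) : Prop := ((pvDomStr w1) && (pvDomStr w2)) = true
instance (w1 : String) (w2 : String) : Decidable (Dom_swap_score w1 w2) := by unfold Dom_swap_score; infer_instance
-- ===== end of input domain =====

-- B replaces A's recursion-with-slicing by one iterative pass over the zipped characters
-- with an explicit mismatch counter (objective: faster).

-- ===== PORT A =====
-- Literal port of A's recursion on the character lists; the `| _, _ => 0` catch-all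
-- corresponds to the inputs where Python raises IndexError (excluded by Pre_).
def swapScoreA : List Char → List Char → Int
  | l1, l2 =>
    if l1 = l2 then 0
    else
      let l1' := if l1.length > l2.length then l1.take l2.length else l1
      let l2' := if l1.length > l2.length then l2 else l2.take l1.length
      match h1 : l1', h2 : l2' with
      | a :: r1, b :: r2 =>
        if a = b then swapScoreA r1 r2 else 1 + swapScoreA r1 r2
      | _, _ => 0
  termination_by l1 l2 => l1.length
  decreasing_by
    all_goals
      { have hle : l1'.length ≤ l1.length := by
          simp only [l1']
          split <;> simp [List.length_take]
        rw [h1] at hle; simp at hle; omega }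

def swap_score (w1 : String) (w2 : String) : Int := swapScoreA w1.toList w2.toList

-- ===== PORT B =====
def swap_score_alt (w1 : String) (w2 : String) : Int :=
  (w1.toList.zip w2.toList).foldl (fun count p => if p.1 ≠ p.2 then count + 1 else count) 0

-- ===== PRECONDITION & SPEC =====
-- Pre_ excludes exactly the inputs on which A raises IndexError: one string empty, the other not.
def Pre_swap_score (w1 : String) (w2 : String) : Prop := (w1 = "" ↔ w2 = "")
instance (w1 : String) (w2 : String) : Decidable (Pre_swap_score w1 w2) := by unfold Pre_swap_score; infer_instance
def pvWitness_swap_score : String × String := ("word", "weird")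

def Spec_swap_score (w1 : String) (w2 : String) (out : Int) : Prop := out = swap_score_alt w1 w2
instance (w1 : String) (w2 : String) (out : Int) : Decidable (Spec_swap_score w1 w2 out) := by unfold Spec_swap_score; infer_instance

-- ===== CLAIM (what is proved, stated in full; the proofs are below) =====
def Claim_equal_swap_score : Prop := ∀ (w1 : String) (w2 : String), Dom_swap_score w1 w2 → Pre_swap_score w1 w2 → Spec_swap_score w1 w2 (swap_score w1 w2)

-- ===== LEMMAS AND PROOFS =====

-- B's fold as a function of the zipped list.
def cntB (zs : List (Char × Char)) : Int :=
  zs.foldl (fun count p => if p.1 ≠ p.2 then count + 1 else count) 0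

lemma cntB_shift (zs : List (Char × Char)) (c : Int) :
    zs.foldl (fun count p => if p.1 ≠ p.2 then count + 1 else count) c = c + cntB zs := by
  induction zs generalizing c with
  | nil => simp [cntB]
  | cons x xs ih =>
    simp only [cntB, List.foldl_cons]
    rw [ih, ih]
    split <;> ring

lemma cntB_cons (x : Char × Char) (xs : List (Char × Char)) :
    cntB (x :: xs) = (if x.1 ≠ x.2 then 1 else 0) + cntB xs := by
  simp only [cntB, List.foldl_cons]
  rw [cntB_shift]
  split <;> simp [cntB]

lemma cntB_self (l : List Char) : cntB (l.zip l) = 0 := by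
  induction l with
  | nil => simp [cntB]
  | cons a t ih => rw [List.zip_cons_cons, cntB_cons]; simp [ih]

lemma zip_take_left (l1 l2 : List Char) : (l1.take l2.length).zip l2 = l1.zip l2 := by
  induction l2 generalizing l1 with
  | nil => simp
  | cons b t ih => cases l1 with
    | nil => simp
    | cons a s => simp [List.zip_cons_cons, ih]

lemma zip_take_right (l1 l2 : List Char) : l1.zip (l2.take l1.length) = l1.zip l2 := by
  induction l1 generalizing l2 with
  | nil => simp
  | cons a s ih => cases l2 with
    | nil => simp
    | cons b t => simp [List.zip_cons_cons, ih]

lemma swapScoreA_eq_cntB : ∀ (n : ℕ) (l1 l2 : List Char), l1.length ≤ n →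
    (l1 = [] ↔ l2 = []) → swapScoreA l1 l2 = cntB (l1.zip l2) := by
  intro n
  induction n with
  | zero =>
    intro l1 l2 hn hiff
    have h1 : l1 = [] := by cases l1 <;> simp_all
    have h2 : l2 = [] := hiff.mp h1
    subst h1 h2
    simp [swapScoreA, cntB]
  | succ n ih =>
    intro l1 l2 hn hiff
    by_cases heq : l1 = l2
    · subst heq
      rw [swapScoreA]
      simp [cntB_self]
    · -- both nonempty
      cases l1 with
      | nil => exact absurd (hiff.mp rfl).symm heq
      | cons a t1 =>
        cases l2 with
        | nil => simp at hiff
        | cons b t2 =>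
          rw [swapScoreA]
          simp only [heq, if_false]
          by_cases hlen : (a :: t1).length > (b :: t2).length
          · have hcons : (a :: t1).take (b :: t2).length = a :: t1.take t2.length := by
              simp [List.take_succ_cons]
            rw [if_pos hlen, if_pos hlen, hcons]
            have hrec : swapScoreA (t1.take t2.length) t2 = cntB ((t1.take t2.length).zip t2) := by
              apply ih
              · simp at hn ⊢; omega
              · constructor
                · intro h
                  have hl := congrArg List.length h
                  simp [List.length_take] at hl hlen
                  rcases hl with h | h
                  · exact h
                  · subst h; simp at hlen
                · intro h; subst h; simp
            have hz : (t1.take t2.length).zip t2 = t1.zip t2 := zip_take_left t1 t2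
            rw [List.zip_cons_cons, cntB_cons]
            by_cases hab : a = b <;> simp [hab, hrec, hz]
          · have hcons : (b :: t2).take (a :: t1).length = b :: t2.take t1.length := by
              simp [List.take_succ_cons]
            rw [if_neg hlen, if_neg hlen, hcons]
            have hrec : swapScoreA t1 (t2.take t1.length) = cntB (t1.zip (t2.take t1.length)) := by
              apply ih
              · simp at hn; omega
              · constructor
                · intro h; subst h; simp
                · intro h
                  have hl := congrArg List.length h
                  simp [List.length_take] at hl hlen
                  rcases hl with h | h
                  · exact h
                  · subst h; simpa using hlen
            have hz : t1.zip (t2.take t1.length) = t1.zip t2 := zip_take_right t1 t2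
            rw [List.zip_cons_cons, cntB_cons]
            by_cases hab : a = b <;> simp [hab, hrec, hz]

lemma str_empty_iff_toList (s : String) : s = "" ↔ s.toList = [] := by
  constructor
  · intro h; subst h; rfl
  · intro h
    exact String.toList_eq_nil_iff.mp h

-- ===== VERDICT (by name: the statement is the Claim_ definition above) =====
theorem swap_score_spec : Claim_equal_swap_score := by
  intro w1 w2 _ hpre
  unfold Spec_swap_score swap_score swap_score_alt
  rw [swapScoreA_eq_cntB w1.toList.length _ _ le_rfl]
  · rfl
  · rw [← str_empty_iff_toList, ← str_empty_iff_toList]; exact hpre
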